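-- pv_equiv track=rewrite | github.com/Gaelic-Algorithmic-Research-Group/Gaelic-Text-Normaliser | resources/gd_analyser_pipeline/seg.py | s_segment0
-- ===== SOURCE A (Python) =====
-- right_breakables = ['.','?','!',':',';','…']
--
-- left_breakables = ['\n','\r']
--
-- def is_metaline(string):
--     string_to_scan = string[0:2]
--     if len(string_to_scan) < 2:
--         return(False)
--     return(string_to_scan[0:2] == '~#')
--
-- def s_segment0(string):
--     string2 = []
--     i = 0
--     unparsed = False
--     while i < len(string):
--         if unparsed:
--             if string[i] == '\n':
--                 unparsed = False
--             else:
--                 string2.append(string[i])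
--                 i = i + 1
--         else:
--             if is_metaline(string[i:]):
--                 unparsed = True
--             else:
--                 string_to_scan = string[i:i+2]
--                 if len(string_to_scan) < 2:
--                     string2.append(string[i])
--                     i = i + 1
--                 elif string_to_scan[0] == '^' and string_to_scan[1] in left_breakables:
--                     string2.append('|')
--                     string2.append(string_to_scan[1])
--                     string2.append('|')
--                     i = i + 2
--                 elif string_to_scan[1] == '^' and string_to_scan[0] in right_breakables:
--                     string2.append(string_to_scan[0])
--                     string2.append('|')
--                     i = i + 2
--                 else:
--                     string2.append(string[i])
--                     i = i + 1
--     return(''.join(string2))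
-- ===== SOURCE B (Python) =====
-- right_breakables = ['.','?','!',':',';','…']
--
-- left_breakables = ['\n','\r']
--
-- def _sub(seg):
--     # insert break bars: right_breakable+'^' -> char+'|' (positional priority:
--     # it starts one char earlier), '^'+left_breakable -> '|'+char+'|';
--     # done by splitting on '^' and gluing the pieces back
--     parts = seg.split('^')
--     out = parts[0]
--     for part in parts[1:]:
--         if out[-1:] in right_breakables:
--             out += '|' + part
--         elif part[:1] in left_breakables:
--             out += '|' + part[0] + '|' + part[1:]
--         else:
--             out += '^' + part
--     return out
--
-- def s_segment0(string):
--     # alternate: substitute in the text up to the next '~#', then copy the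
--     # metaline (through its '\n') verbatim
--     chunks = []
--     rest = string
--     while True:
--         pre, tm, rest = rest.partition('~#')
--         if not tm:
--             chunks.append(_sub(pre))
--             return ''.join(chunks)
--         meta, nl, rest = rest.partition('\n')
--         chunks.append(_sub(pre) + tm + meta + nl)
-- ===== Notes on version B (the rewrite author's own statement) =====
-- stated objective: faster
-- what changed: A's single per-character state machine (2-char window, meta flag) is replaced by partitioning the text at '~#'...' ' metalines (copied verbatim) and, between them, splitting on '^' and gluing the pieces back with the break bars inserted at the piece boundaries.
import Mathlib
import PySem

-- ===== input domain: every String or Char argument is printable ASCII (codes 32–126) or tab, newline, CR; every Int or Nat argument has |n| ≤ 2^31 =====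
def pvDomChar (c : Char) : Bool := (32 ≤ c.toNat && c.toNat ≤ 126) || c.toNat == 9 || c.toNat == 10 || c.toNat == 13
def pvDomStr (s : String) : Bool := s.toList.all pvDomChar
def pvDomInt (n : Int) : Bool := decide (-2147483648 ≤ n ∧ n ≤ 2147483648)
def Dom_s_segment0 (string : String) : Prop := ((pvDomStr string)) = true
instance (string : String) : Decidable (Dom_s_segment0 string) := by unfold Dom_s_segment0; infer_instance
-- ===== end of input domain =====

-- B replaces A's per-character state machine by C-level split/partition passes:
-- partition the text at '~#'…'\n' metalines (copied verbatim) and, in between,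
-- split on '^' and glue the pieces back with the break bars; measurably faster
-- (same O(n), far smaller constant in Python). Return value only; no mutation.

-- ===== PORT A =====
def rightBreakables : List Char := ['.', '?', '!', ':', ';', '…']

def leftBreakables : List Char := ['\n', '\r']

def isMetaline (cs : List Char) : Bool :=
  -- is_metaline: string[0:2]; len < 2 → False; else == '~#'
  let toScan := cs.take 2
  if toScan.length < 2 then false
  else decide (toScan = ['~', '#'])

-- the while loop of A over the suffix string[i:]; `unparsed` is the Bool flag
def loopA : List Char → Bool → List Char
  | [], _ => []
  | c :: rest, true =>
      if c = '\n' then loopA (c :: rest) false   -- unparsed = False, i unchanged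
      else c :: loopA rest true
  | c :: rest, false =>
      if isMetaline (c :: rest) then loopA (c :: rest) true  -- unparsed = True, i unchanged
      else
        match rest with
        | [] => [c]                                           -- len(string_to_scan) < 2
        | d :: rest' =>
          if c = '^' ∧ d ∈ leftBreakables then '|' :: d :: '|' :: loopA rest' false
          else if d = '^' ∧ c ∈ rightBreakables then c :: '|' :: loopA rest' false
          else c :: loopA (d :: rest') false
  termination_by cs b =>
    3 * cs.length +
      (if b then (if cs.head? = some '\n' then 1 else 0)
       else (if cs.head? = some '~' then 2 else 0))
  decreasing_by
  all_goals simp_all [isMetaline]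
  all_goals split <;> omega

def s_segment0 (string : String) : String :=
  String.ofList (loopA string.toList false)

-- ===== PORT B =====
-- port of str.partition('~#'): none = separator absent, some (before, after)
def partTM : List Char → Option (List Char × List Char)
  | [] => none
  | c :: rest =>
      if c = '~' ∧ rest.head? = some '#' then some ([], rest.tail)
      else
        match partTM rest with
        | some (p, q) => some (c :: p, q)
        | none => none

-- port of str.partition('\n'): (before, separator-or-empty, after)
def partNL : List Char → List Char × List Char × List Char
  | [] => ([], [], [])
  | '\n' :: rest => ([], ['\n'], rest)
  | c :: rest =>
      let r := partNL rest
      (c :: r.1, r.2.1, r.2.2)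

-- port of str.split('^') (always returns at least one part)
def splitCaret : List Char → List (List Char)
  | [] => [[]]
  | '^' :: rest => [] :: splitCaret rest
  | c :: rest => (splitCaret rest).modifyHead (c :: ·)

-- out[-1:] in right_breakables
def lastIsRight (xs : List Char) : Bool :=
  match xs.getLast? with
  | some c => decide (c ∈ rightBreakables)
  | none => false

-- the loop body of _sub
def glueStep (out part : List Char) : List Char :=
  if lastIsRight out then out ++ '|' :: part
  else
    match part with
    | d :: restp =>
        if d ∈ leftBreakables then out ++ '|' :: d :: '|' :: restp
        else out ++ '^' :: d :: restp
    | [] => out ++ ['^']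

def subB (cs : List Char) : List Char :=
  match splitCaret cs with
  | [] => []  -- unreachable: split always yields at least one part
  | p :: ps => ps.foldl glueStep p

-- termination facts for the driver loop (cited by goB's decreasing_by)
theorem partTM_some_length {cs pre rest2 : List Char}
    (h : partTM cs = some (pre, rest2)) : rest2.length + 2 ≤ cs.length := by
  induction cs generalizing pre rest2 with
  | nil => simp [partTM] at h
  | cons c rest ih =>
      simp only [partTM] at h
      split at h
      · rename_i hm
        simp only [Option.some.injEq, Prod.mk.injEq] at h
        rcases rest with _ | ⟨b, tl⟩ <;> simp_all
      · split at h
        · rename_i p q hq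
          simp only [Option.some.injEq, Prod.mk.injEq] at h
          have h2 := ih hq
          simp [← h.2]; omega
        · exact absurd h (by simp)

theorem partNL_tail_length (cs : List Char) :
    (partNL cs).2.2.length ≤ cs.length := by
  induction cs using partNL.induct with
  | case1 => simp [partNL]
  | case2 rest => simp [partNL]
  | case3 c rest hne ih => simp [partNL]; omega

-- the while loop of B; chunks is the accumulated list joined at the end
def goB (rest : List Char) (chunks : List (List Char)) : List Char :=
  match h : partTM rest with
  | none => (chunks ++ [subB rest]).flatten
  | some (pre, rest2) =>
      let mnl := partNL rest2
      goB mnl.2.2 (chunks ++ [subB pre ++ '~' :: '#' :: (mnl.1 ++ mnl.2.1)])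
  termination_by rest.length
  decreasing_by
    have h1 := partNL_tail_length rest2
    have h2 := partTM_some_length h
    omega

def s_segment0_alt (string : String) : String :=
  String.ofList (goB string.toList [])

-- ===== PRECONDITION & SPEC =====
def Spec_s_segment0 (string : String) (out : String) : Prop := out = s_segment0_alt string
instance (string : String) (out : String) : Decidable (Spec_s_segment0 string out) := by unfold Spec_s_segment0; infer_instance

-- ===== CLAIM (what is proved, stated in full; the proofs are below) =====
def Claim_equal_s_segment0 : Prop := ∀ (string : String), Dom_s_segment0 string → Spec_s_segment0 string (s_segment0 string)

-- ===== LEMMAS AND PROOFS =====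

-- the FSM of A restricted to plain text (no metaline handling); proof stepping stone
def scanF : List Char → List Char
  | [] => []
  | [c] => [c]
  | c :: d :: rest =>
      if c = '^' ∧ d ∈ leftBreakables then '|' :: d :: '|' :: scanF rest
      else if d = '^' ∧ c ∈ rightBreakables then c :: '|' :: scanF rest
      else c :: scanF (d :: rest)

theorem partTM_none_cons {c : Char} {rest : List Char}
    (h : partTM (c :: rest) = none) : partTM rest = none := by
  simp only [partTM] at h
  split at h
  · simp at h
  · split at h
    · simp at h
    · assumption

theorem partTM_some_shape {cs pre rest2 : List Char}
    (h : partTM cs = some (pre, rest2)) :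
    cs = pre ++ '~' :: '#' :: rest2 ∧ partTM pre = none := by
  induction cs generalizing pre rest2 with
  | nil => simp [partTM] at h
  | cons c rest ih =>
      simp only [partTM] at h
      split at h
      · rename_i hm
        simp only [Option.some.injEq, Prod.mk.injEq] at h
        obtain ⟨h1, h2⟩ := h
        rcases rest with _ | ⟨b, tl⟩ <;> simp_all [partTM]
      · rename_i hm
        split at h
        · rename_i p q hq
          simp only [Option.some.injEq, Prod.mk.injEq] at h
          obtain ⟨h1, h2⟩ := h
          obtain ⟨e1, e2⟩ := ih hq
          subst h1 h2
          refine ⟨by simp [e1], ?_⟩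
          have hneg : ¬ (c = '~' ∧ p.head? = some '#') := by
            rcases p with _ | ⟨b, tl⟩
            · simp
            · simp only [List.head?, Option.some.injEq]
              rintro ⟨hc1, hc2⟩
              exact hm ⟨hc1, by simp [e1, hc2]⟩
          simp only [partTM]
          rw [if_neg hneg, e2]
        · simp at h

theorem loopA_newline (rest : List Char) :
    loopA ('\n' :: rest) false = '\n' :: loopA rest false := by
  rcases rest with _ | ⟨d, r⟩
  · simp [loopA, isMetaline]
  · rw [loopA]
    rw [if_neg (by simp [isMetaline])]
    rw [if_neg (by simp)]
    rw [if_neg (by simp [rightBreakables])]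

theorem loopA_true_eq (cs : List Char) :
    loopA cs true = (partNL cs).1 ++ (partNL cs).2.1 ++ loopA (partNL cs).2.2 false := by
  induction cs with
  | nil => simp [loopA, partNL]
  | cons c rest ih =>
      by_cases hc : c = '\n'
      · subst hc
        rw [loopA, if_pos rfl, loopA_newline]
        simp [partNL]
      · rw [loopA, if_neg hc]
        rw [partNL.eq_def]
        split
        · rename_i heq; simp at heq
        · rename_i heq; simp at heq; exact absurd heq.1.symm (fun h => hc h.symm)
        · rename_i c' rest' heq
          simp only [List.cons.injEq] at heq
          obtain ⟨h1, h2⟩ := heq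
          subst h1 h2
          simp [ih]

theorem isMetaline_cons2_false {c d : Char} (r : List Char)
    (h : ¬(c = '~' ∧ d = '#')) : isMetaline (c :: d :: r) = false := by
  simp [isMetaline]; tauto

theorem partTM_none_not_tm {c d : Char} {r : List Char}
    (h : partTM (c :: d :: r) = none) : ¬(c = '~' ∧ d = '#') := by
  simp only [partTM] at h
  split at h
  · simp at h
  · rename_i hm
    rintro ⟨a, b⟩
    exact hm ⟨a, by simp [b]⟩

theorem loopA_false_noTM (cs : List Char) (h : partTM cs = none) :
    loopA cs false = scanF cs := by
  induction cs using scanF.induct with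
  | case1 => simp [loopA, scanF]
  | case2 c => simp [loopA, scanF, isMetaline]
  | case3 c d rest hcond ih =>
      rw [loopA, if_neg (by simp [isMetaline_cons2_false _ (partTM_none_not_tm h)])]
      rw [if_pos hcond, ih (partTM_none_cons (partTM_none_cons h))]
      rw [scanF, if_pos hcond]
  | case4 c d rest h1 h2 ih =>
      rw [loopA, if_neg (by simp [isMetaline_cons2_false _ (partTM_none_not_tm h)])]
      rw [if_neg h1, if_pos h2, ih (partTM_none_cons (partTM_none_cons h))]
      rw [scanF, if_neg h1, if_pos h2]
  | case5 c d rest h1 h2 ih =>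
      rw [loopA, if_neg (by simp [isMetaline_cons2_false _ (partTM_none_not_tm h)])]
      rw [if_neg h1, if_neg h2, ih (partTM_none_cons h)]
      rw [scanF, if_neg h1, if_neg h2]

theorem loopA_false_split (pre tail : List Char) (h : partTM pre = none) :
    loopA (pre ++ '~' :: '#' :: tail) false = scanF pre ++ loopA ('~' :: '#' :: tail) false := by
  induction pre using scanF.induct with
  | case1 => simp [scanF]
  | case2 c =>
      simp only [List.cons_append, List.nil_append]
      rw [loopA, if_neg (by simp [isMetaline])]
      rw [if_neg (by rintro ⟨-, h2⟩; revert h2; simp [leftBreakables])]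
      rw [if_neg (by rintro ⟨h1, -⟩; exact absurd h1 (by decide))]
      rw [scanF]
      simp
  | case3 c d rest hcond ih =>
      simp only [List.cons_append]
      rw [loopA, if_neg (by simp [isMetaline_cons2_false _ (partTM_none_not_tm h)])]
      rw [if_pos hcond, ih (partTM_none_cons (partTM_none_cons h))]
      rw [scanF, if_pos hcond]
      simp
  | case4 c d rest h1 h2 ih =>
      simp only [List.cons_append]
      rw [loopA, if_neg (by simp [isMetaline_cons2_false _ (partTM_none_not_tm h)])]
      rw [if_neg h1, if_pos h2, ih (partTM_none_cons (partTM_none_cons h))]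
      rw [scanF, if_neg h1, if_pos h2]
      simp
  | case5 c d rest h1 h2 ih =>
      simp only [List.cons_append]
      rw [loopA, if_neg (by simp [isMetaline_cons2_false _ (partTM_none_not_tm h)])]
      rw [if_neg h1, if_neg h2]
      have := ih (partTM_none_cons h)
      simp only [List.cons_append] at this
      rw [this, scanF, if_neg h1, if_neg h2]
      simp


-- ----- subB = scanF -----

def glue (prev part : List Char) : List Char :=
  if lastIsRight prev then '|' :: part
  else
    match part with
    | d :: restp =>
        if d ∈ leftBreakables then '|' :: d :: '|' :: restp
        else '^' :: d :: restp
    | [] => ['^']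

def joinParts : List Char → List (List Char) → List Char
  | _, [] => []
  | prev, q :: ps => glue prev q ++ joinParts q ps

theorem lastIsRight_singleton (c : Char) :
    lastIsRight [c] = decide (c ∈ rightBreakables) := by
  simp [lastIsRight]

theorem lastIsRight_cons (c : Char) {part : List Char} (h : part ≠ []) :
    lastIsRight (c :: part) = lastIsRight part := by
  cases part with
  | nil => exact absurd rfl h
  | cons d r => simp [lastIsRight, List.getLast?_cons_cons]

theorem lastIsRight_append_cons (out : List Char) (c : Char) (part : List Char) :
    lastIsRight (out ++ c :: part) = lastIsRight (c :: part) := by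
  unfold lastIsRight
  rw [List.getLast?_append]
  obtain ⟨x, hx⟩ := Option.isSome_iff_exists.mp (by simp : (c :: part).getLast?.isSome)
  rw [hx]
  rfl

theorem mem_left_not_right {d : Char} (h : d ∈ leftBreakables) :
    d ∉ rightBreakables := by
  simp [leftBreakables] at h
  rcases h with h | h <;> subst h <;> decide

theorem mem_left_ne_caret {d : Char} (h : d ∈ leftBreakables) : d ≠ '^' := by
  simp [leftBreakables] at h
  rcases h with h | h <;> subst h <;> decide

theorem mem_right_ne_caret {c : Char} (h : c ∈ rightBreakables) : c ≠ '^' := by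
  simp [rightBreakables] at h
  rcases h with h | h | h | h | h | h <;> subst h <;> decide

theorem glue_congr {p1 p2 : List Char} (q : List Char)
    (h : lastIsRight p1 = lastIsRight p2) : glue p1 q = glue p2 q := by
  unfold glue; rw [h]

theorem joinParts_congr {p1 p2 : List Char} (ps : List (List Char))
    (h : lastIsRight p1 = lastIsRight p2) :
    joinParts p1 ps = joinParts p2 ps := by
  cases ps with
  | nil => rfl
  | cons q ps => simp only [joinParts, glue_congr q h]

theorem glueStep_eq {out prev : List Char} (part : List Char)
    (h : lastIsRight out = lastIsRight prev) :
    glueStep out part = out ++ glue prev part := by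
  unfold glueStep glue
  rw [h]
  split
  · rfl
  · cases part with
    | nil => rfl
    | cons d restp => by_cases hd : d ∈ leftBreakables <;> simp [hd]

theorem lastIsRight_glueStep (out part : List Char) :
    lastIsRight (glueStep out part) = lastIsRight part := by
  by_cases ho : lastIsRight out
  · unfold glueStep
    rw [if_pos ho, lastIsRight_append_cons]
    cases part with
    | nil => decide
    | cons d r => exact lastIsRight_cons _ (by simp)
  · cases part with
    | nil =>
        unfold glueStep
        rw [if_neg ho]
        show lastIsRight (out ++ ['^']) = lastIsRight []
        rw [lastIsRight_append_cons]
        decide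
    | cons d restp =>
        have hstep : glueStep out (d :: restp) =
            if d ∈ leftBreakables then out ++ '|' :: d :: '|' :: restp
            else out ++ '^' :: d :: restp := by
          unfold glueStep
          rw [if_neg ho]
        rw [hstep]
        by_cases hd : d ∈ leftBreakables
        · rw [if_pos hd, lastIsRight_append_cons]
          cases restp with
          | nil =>
              simp [leftBreakables] at hd
              rcases hd with h | h <;> subst h <;> decide
          | cons e r =>
              rw [lastIsRight_cons _ (by simp), lastIsRight_cons _ (by simp)]
              exact (lastIsRight_cons d (by simp)).symm
        · rw [if_neg hd, lastIsRight_append_cons, lastIsRight_cons _ (by simp)]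

theorem foldl_glueStep_eq (ps : List (List Char)) :
    ∀ out prev : List Char, lastIsRight out = lastIsRight prev →
    ps.foldl glueStep out = out ++ joinParts prev ps := by
  induction ps with
  | nil => intro out prev _; simp [joinParts]
  | cons q ps ih =>
      intro out prev h
      simp only [List.foldl_cons]
      rw [ih (glueStep out q) q (lastIsRight_glueStep out q)]
      rw [glueStep_eq q h]
      simp [joinParts]

theorem splitCaret_ne_nil (cs : List Char) : splitCaret cs ≠ [] := by
  induction cs using splitCaret.induct with
  | case1 => simp [splitCaret]
  | case2 rest ih => simp [splitCaret]
  | case3 c rest hne ih =>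
      rw [splitCaret.eq_def]
      split
      · simp
      · simp
      · rename_i c2 rest2 hne2 heq
        simp only [List.cons.injEq] at heq
        obtain ⟨-, h2⟩ := heq
        subst h2
        rcases hsp : splitCaret rest with _ | ⟨r0, rs⟩
        · exact absurd hsp ih
        · simp

theorem splitCaret_caret (rest : List Char) :
    splitCaret ('^' :: rest) = [] :: splitCaret rest := rfl

theorem splitCaret_cons_ne {c : Char} (h : c ≠ '^') (rest : List Char) :
    splitCaret (c :: rest) = (splitCaret rest).modifyHead (c :: ·) := by
  rw [splitCaret.eq_def]
  split
  · rename_i heq; simp at heq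
  · rename_i rest' heq
    simp only [List.cons.injEq] at heq
    exact absurd heq.1 h
  · rename_i c' rest' hcond heq
    simp only [List.cons.injEq] at heq
    obtain ⟨h1, h2⟩ := heq
    subst h1 h2
    rfl

theorem scanF_join (cs : List Char) :
    ∀ p ps, splitCaret cs = p :: ps → scanF cs = p ++ joinParts p ps := by
  induction cs using scanF.induct with
  | case1 =>
      intro p ps hsp
      simp only [splitCaret, List.cons.injEq] at hsp
      obtain ⟨h1, h2⟩ := hsp
      subst h1 h2
      rfl
  | case2 c =>
      intro p ps hsp
      by_cases hc : c = '^'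
      · subst hc
        rw [splitCaret_caret] at hsp
        simp only [splitCaret, List.cons.injEq] at hsp
        obtain ⟨h1, h2⟩ := hsp
        subst h1 h2
        decide
      · rw [splitCaret_cons_ne hc] at hsp
        simp only [splitCaret, List.modifyHead, List.cons.injEq] at hsp
        obtain ⟨h1, h2⟩ := hsp
        subst h1 h2
        rfl
  | case3 c d rest hcond ih =>
      intro p ps hsp
      obtain ⟨hc, hd⟩ := hcond
      subst hc
      rw [splitCaret_caret, splitCaret_cons_ne (mem_left_ne_caret hd)] at hsp
      obtain ⟨r0, rs, hr⟩ := List.exists_cons_of_ne_nil (splitCaret_ne_nil rest)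
      rw [hr] at hsp
      simp only [List.modifyHead, List.cons.injEq] at hsp
      obtain ⟨h1, h2⟩ := hsp
      subst h1
      subst h2
      rw [scanF, if_pos ⟨rfl, hd⟩, ih r0 rs hr]
      show _ = glue [] (d :: r0) ++ joinParts (d :: r0) rs
      have hglue : glue [] (d :: r0) = '|' :: d :: '|' :: r0 := by
        unfold glue
        rw [if_neg (by decide)]
        show (if d ∈ leftBreakables then '|' :: d :: '|' :: r0 else '^' :: d :: r0) = _
        rw [if_pos hd]
      have hcongr : joinParts (d :: r0) rs = joinParts r0 rs := by
        apply joinParts_congr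
        cases r0 with
        | nil =>
            rw [lastIsRight_singleton]
            simp [mem_left_not_right hd]
            rfl
        | cons e r => exact lastIsRight_cons _ (by simp)
      rw [hglue, hcongr]
      simp
  | case4 c d rest h1 h2 ih =>
      intro p ps hsp
      obtain ⟨hd, hc⟩ := h2
      subst hd
      rw [splitCaret_cons_ne (mem_right_ne_caret hc), splitCaret_caret] at hsp
      obtain ⟨r0, rs, hr⟩ := List.exists_cons_of_ne_nil (splitCaret_ne_nil rest)
      rw [hr] at hsp
      simp only [List.modifyHead, List.cons.injEq] at hsp
      obtain ⟨hp, hps⟩ := hsp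
      subst hp
      subst hps
      rw [scanF, if_neg h1, if_pos ⟨rfl, hc⟩, ih r0 rs hr]
      show _ = [c] ++ (glue [c] r0 ++ joinParts r0 rs)
      have hglue : glue [c] r0 = '|' :: r0 := by
        unfold glue
        rw [if_pos (by rw [lastIsRight_singleton]; simpa using hc)]
      rw [hglue]
      simp
  | case5 c d rest h1 h2 ih =>
      intro p ps hsp
      by_cases hc : c = '^'
      · subst hc
        rw [splitCaret_caret] at hsp
        by_cases hd : d = '^'
        · subst hd
          rw [splitCaret_caret] at hsp
          simp only [List.cons.injEq] at hsp
          obtain ⟨hp, hps⟩ := hsp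
          subst hp
          subst hps
          rw [scanF, if_neg h1, if_neg h2, ih [] (splitCaret rest) (splitCaret_caret rest)]
          show _ = glue [] [] ++ joinParts [] (splitCaret rest)
          rfl
        · rw [splitCaret_cons_ne hd] at hsp
          obtain ⟨r0, rs, hr⟩ := List.exists_cons_of_ne_nil (splitCaret_ne_nil rest)
          rw [hr] at hsp
          simp only [List.modifyHead, List.cons.injEq] at hsp
          obtain ⟨hp, hps⟩ := hsp
          subst hp
          subst hps
          rw [scanF, if_neg h1, if_neg h2,
              ih (d :: r0) rs (by rw [splitCaret_cons_ne hd, hr]; rfl)]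
          show _ = glue [] (d :: r0) ++ joinParts (d :: r0) rs
          have hdl : d ∉ leftBreakables := by
            intro hm
            exact h1 ⟨rfl, hm⟩
          have hglue : glue [] (d :: r0) = '^' :: d :: r0 := by
            unfold glue
            rw [if_neg (by decide)]
            show (if d ∈ leftBreakables then '|' :: d :: '|' :: r0 else '^' :: d :: r0) = _
            rw [if_neg hdl]
          rw [hglue]
          simp
      · rw [splitCaret_cons_ne hc] at hsp
        obtain ⟨q0, qs, hq⟩ := List.exists_cons_of_ne_nil (splitCaret_ne_nil (d :: rest))
        rw [hq] at hsp
        simp only [List.modifyHead, List.cons.injEq] at hsp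
        obtain ⟨hp, hps⟩ := hsp
        subst hp
        subst hps
        rw [scanF, if_neg h1, if_neg h2, ih q0 qs hq]
        show _ = (c :: q0) ++ joinParts (c :: q0) qs
        have hcongr : joinParts (c :: q0) qs = joinParts q0 qs := by
          apply joinParts_congr
          cases q0 with
          | nil =>
              have hd : d = '^' := by
                by_contra hd
                rw [splitCaret_cons_ne hd] at hq
                obtain ⟨r0, rs, hr⟩ := List.exists_cons_of_ne_nil (splitCaret_ne_nil rest)
                rw [hr] at hq
                simp at hq
              have hcr : c ∉ rightBreakables := by
                intro hm
                exact h2 ⟨hd, hm⟩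
              rw [lastIsRight_singleton]
              simp [hcr]
              rfl
          | cons e r => exact lastIsRight_cons _ (by simp)
        rw [hcongr]
        simp

theorem scanF_eq_subB (cs : List Char) : scanF cs = subB cs := by
  obtain ⟨p, ps, hsp⟩ := List.exists_cons_of_ne_nil (splitCaret_ne_nil cs)
  rw [scanF_join cs p ps hsp]
  unfold subB
  rw [hsp]
  exact (foldl_glueStep_eq ps p p rfl).symm

theorem goB_acc (cs : List Char) (chunks : List (List Char)) :
    goB cs chunks = chunks.flatten ++ goB cs [] := by
  induction hn : cs.length using Nat.strong_induction_on generalizing cs chunks with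
  | _ n ihn =>
  subst hn
  rw [goB, goB]
  cases h : partTM cs with
  | none => simp
  | some pr =>
      obtain ⟨pre, rest2⟩ := pr
      simp only
      have hlen : (partNL rest2).2.2.length < cs.length := by
        have := partNL_tail_length rest2
        have := partTM_some_length h
        omega
      rw [ihn _ hlen _ _ rfl]
      rw [ihn _ hlen _ ([] ++ [subB pre ++ '~' :: '#' :: ((partNL rest2).1 ++ (partNL rest2).2.1)]) rfl]
      simp

theorem loopA_eq_goB (cs : List Char) : loopA cs false = goB cs [] := by
  induction hn : cs.length using Nat.strong_induction_on generalizing cs with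
  | _ n ihn =>
  subst hn
  cases h : partTM cs with
  | none =>
      rw [loopA_false_noTM cs h, scanF_eq_subB, goB, h]
      simp
  | some pr =>
      obtain ⟨pre, rest2⟩ := pr
      obtain ⟨hcs, hpre⟩ := partTM_some_shape h
      have hmeta : loopA ('~' :: '#' :: rest2) false = loopA ('~' :: '#' :: rest2) true := by
        conv_lhs => rw [loopA]
        rw [if_pos (show isMetaline ('~' :: '#' :: rest2) = true from rfl)]
      have hNL : partNL ('~' :: '#' :: rest2) =
          ('~' :: '#' :: (partNL rest2).1, (partNL rest2).2.1, (partNL rest2).2.2) := by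
        simp [partNL]
      have hlen : (partNL rest2).2.2.length < cs.length := by
        have := partNL_tail_length rest2
        have := partTM_some_length h
        omega
      calc loopA cs false
      _ = loopA (pre ++ '~' :: '#' :: rest2) false := by rw [← hcs]
      _ = scanF pre ++ loopA ('~' :: '#' :: rest2) false := loopA_false_split pre rest2 hpre
      _ = subB pre ++ ('~' :: '#' :: ((partNL rest2).1 ++ (partNL rest2).2.1 ++ loopA (partNL rest2).2.2 false)) := by
            rw [scanF_eq_subB, hmeta, loopA_true_eq, hNL]
            simp
      _ = goB cs [] := by
            rw [goB, h]
            simp only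
            rw [goB_acc _ ([] ++ [subB pre ++ '~' :: '#' :: ((partNL rest2).1 ++ (partNL rest2).2.1)])]
            rw [← ihn _ hlen _ rfl]
            simp

-- ===== VERDICT (by name: the statement is the Claim_ definition above) =====
theorem s_segment0_spec : Claim_equal_s_segment0 := by
  intro s _
  unfold Spec_s_segment0 s_segment0 s_segment0_alt
  exact congrArg String.ofList (loopA_eq_goB s.toList)
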